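-- pv_equiv track=rewrite | github.com/Yuanhp-jnu/SE-project | instrument.py | find_max_coordinates
-- ===== SOURCE A (Python) =====
-- def find_max_coordinates(matrix):
--     """
--     寻找二维数组matrix中最大值的坐标，可能是单个，也可能是多个
--     :param matrix:
--     :return:
--     """
--     max_value = float('-inf')
--     max_coordinates = []
--
--     for i in range(len(matrix)):
--         for j in range(len(matrix[i])):
--             if matrix[i][j] > max_value:
--                 max_value = matrix[i][j]
--                 max_coordinates = [(i, j)]
--             elif matrix[i][j] == max_value:
--                 max_coordinates.append((i, j))
--
--     return max_coordinates
-- ===== SOURCE B (Python) =====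
-- def find_max_coordinates(matrix):
--     max_value = float('-inf')
--     for row in matrix:
--         for x in row:
--             if x > max_value:
--                 max_value = x
--     max_coordinates = []
--     for i, row in enumerate(matrix):
--         for j, x in enumerate(row):
--             if x == max_value:
--                 max_coordinates.append((i, j))
--     return max_coordinates
-- ===== Notes on version B (the rewrite author's own statement) =====
-- stated objective: simpler
-- what changed: Replaces A's single pass that maintains and resets a coordinate list on each new maximum with two plain passes: first a fold computing the maximum value, then a row-major scan collecting the coordinates equal to it.
import Mathlib
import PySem

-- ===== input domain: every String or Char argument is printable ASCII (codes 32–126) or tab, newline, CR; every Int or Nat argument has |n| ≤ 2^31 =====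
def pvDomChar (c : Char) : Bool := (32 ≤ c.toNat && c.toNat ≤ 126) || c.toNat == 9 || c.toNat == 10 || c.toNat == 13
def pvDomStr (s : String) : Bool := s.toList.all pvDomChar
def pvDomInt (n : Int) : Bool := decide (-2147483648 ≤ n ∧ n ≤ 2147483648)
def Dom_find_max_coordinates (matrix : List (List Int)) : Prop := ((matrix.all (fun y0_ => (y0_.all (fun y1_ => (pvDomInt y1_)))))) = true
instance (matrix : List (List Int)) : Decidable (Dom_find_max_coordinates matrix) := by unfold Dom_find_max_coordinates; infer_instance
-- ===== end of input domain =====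

-- B replaces A's single pass that resets a coordinate list on each new maximum by two plain
-- passes (compute the maximum, then collect equal cells); objective: simpler.


-- ===== PORT A =====
-- float('-inf') is modelled as `none : Option Int`: every Int compares strictly greater
-- than it and no Int equals it, exactly Python's comparison of an int with -inf.
def find_max_coordinates (matrix : List (List Int)) : List (Int × Int) :=
  ((PySem.List.enumerate matrix).foldl (fun s p =>
      (PySem.List.enumerate p.2).foldl (fun s q =>
        match s.1 with
        | none => (some q.2, [(p.1, q.1)])
        | some v =>
          if q.2 > v then (some q.2, [(p.1, q.1)])
          else if q.2 = v then (s.1, s.2 ++ [(p.1, q.1)])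
          else s) s)
    ((none : Option Int), ([] : List (Int × Int)))).2

-- ===== PORT B =====
-- First pass of Source B: fold computing the maximum (none = float('-inf')).
def pvAltMax (matrix : List (List Int)) : Option Int :=
  matrix.foldl (fun m row => row.foldl (fun m x =>
      match m with
      | none => some x
      | some v => if x > v then some x else some v) m) (none : Option Int)

def find_max_coordinates_alt (matrix : List (List Int)) : List (Int × Int) :=
  let m := pvAltMax matrix
  (PySem.List.enumerate matrix).foldl (fun acc p =>
    (PySem.List.enumerate p.2).foldl (fun acc q =>
      if some q.2 = m then acc ++ [(p.1, q.1)] else acc) acc) []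

-- ===== PRECONDITION & SPEC =====
def Spec_find_max_coordinates (matrix : List (List Int)) (out : List (Int × Int)) : Prop := out = find_max_coordinates_alt matrix
instance (matrix : List (List Int)) (out : List (Int × Int)) : Decidable (Spec_find_max_coordinates matrix out) := by unfold Spec_find_max_coordinates; infer_instance

-- ===== CLAIM (what is proved, stated in full; the proofs are below) =====
def Claim_equal_find_max_coordinates : Prop := ∀ (matrix : List (List Int)), Dom_find_max_coordinates matrix → Spec_find_max_coordinates matrix (find_max_coordinates matrix)

-- ===== LEMMAS AND PROOFS =====

-- All cells of the matrix as (rowIndex, colIndex, value), in row-major order.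
def pvCells (matrix : List (List Int)) : List (Int × Int × Int) :=
  (PySem.List.enumerate matrix).flatMap (fun p =>
    (PySem.List.enumerate p.2).map (fun q => (p.1, q.1, q.2)))

def pvStepA (s : Option Int × List (Int × Int)) (t : Int × Int × Int) :
    Option Int × List (Int × Int) :=
  match s.1 with
  | none => (some t.2.2, [(t.1, t.2.1)])
  | some v =>
    if t.2.2 > v then (some t.2.2, [(t.1, t.2.1)])
    else if t.2.2 = v then (s.1, s.2 ++ [(t.1, t.2.1)])
    else s

def pvStepM (m : Option Int) (x : Int) : Option Int :=
  match m with
  | none => some x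
  | some v => if x > v then some x else some v

-- closed form of B's second pass
def pvCol (M : Option Int) (L : List (Int × Int × Int)) : List (Int × Int) :=
  (L.filter (fun t => some t.2.2 = M)).map (fun t => (t.1, t.2.1))

theorem pvFoldl_flatMap {α β γ : Type} (l : List α) (g : α → List β) (f : γ → β → γ)
    (init : γ) : (l.flatMap g).foldl f init = l.foldl (fun a x => (g x).foldl f a) init := by
  induction l generalizing init with
  | nil => rfl
  | cons a l ih => simp [List.flatMap_cons, List.foldl_append, ih]

theorem pvPortA_eq (matrix : List (List Int)) :
    find_max_coordinates matrix = ((pvCells matrix).foldl pvStepA (none, [])).2 := by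
  simp only [find_max_coordinates, pvCells, pvFoldl_flatMap, List.foldl_map, pvStepA]

theorem pvAltMax_eq (matrix : List (List Int)) :
    pvAltMax matrix = (pvCells matrix).foldl (fun m t => pvStepM m t.2.2) none := by
  unfold pvAltMax pvCells
  rw [pvFoldl_flatMap]
  conv_lhs => rw [← PySem.List.map_snd_enumerate matrix 0]
  rw [List.foldl_map]
  congr 1
  funext m p
  conv_lhs => rw [← PySem.List.map_snd_enumerate p.2 0]
  rw [List.foldl_map, List.foldl_map]
  rfl

theorem pvStepM_mono (L : List (Int × Int × Int)) (v : Int) :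
    ∃ w, L.foldl (fun m t => pvStepM m t.2.2) (some v) = some w ∧ v ≤ w := by
  induction L generalizing v with
  | nil => exact ⟨v, rfl, le_refl v⟩
  | cons t L ih =>
    simp only [List.foldl_cons, pvStepM]
    by_cases h : t.2.2 > v
    · simp only [if_pos h]
      obtain ⟨w, hw, hle⟩ := ih t.2.2
      exact ⟨w, hw, le_of_lt (lt_of_lt_of_le h hle)⟩
    · simp only [if_neg h]
      exact ih v

theorem pvCol_cons (M : Option Int) (t : Int × Int × Int) (L : List (Int × Int × Int)) :
    pvCol M (t :: L) = (if some t.2.2 = M then [(t.1, t.2.1)] else []) ++ pvCol M L := by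
  by_cases h : some t.2.2 = M
  · simp [pvCol, h]
  · simp [pvCol, h]

theorem pvStepA_none (c : List (Int × Int)) (t : Int × Int × Int) :
    pvStepA (none, c) t = (some t.2.2, [(t.1, t.2.1)]) := rfl

theorem pvStepA_gt (v : Int) (c : List (Int × Int)) (t : Int × Int × Int) (h : t.2.2 > v) :
    pvStepA (some v, c) t = (some t.2.2, [(t.1, t.2.1)]) := by simp [pvStepA, h]

theorem pvStepA_eq' (v : Int) (c : List (Int × Int)) (t : Int × Int × Int)
    (h2 : t.2.2 = v) :
    pvStepA (some v, c) t = (some v, c ++ [(t.1, t.2.1)]) := by simp [pvStepA, h2]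

theorem pvStepA_lt (v : Int) (c : List (Int × Int)) (t : Int × Int × Int)
    (h1 : ¬ t.2.2 > v) (h2 : ¬ t.2.2 = v) :
    pvStepA (some v, c) t = (some v, c) := by simp [pvStepA, h1, h2]

theorem pvStepM_none (x : Int) : pvStepM none x = some x := rfl

theorem pvStepM_gt (v x : Int) (h : x > v) : pvStepM (some v) x = some x := by
  simp [pvStepM, h]

theorem pvStepM_le (v x : Int) (h : ¬ x > v) : pvStepM (some v) x = some v := by
  simp [pvStepM, h]

theorem pvFoldA_eq (L : List (Int × Int × Int)) (m : Option Int) (c : List (Int × Int)) :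
    L.foldl pvStepA (m, c) =
      (L.foldl (fun m t => pvStepM m t.2.2) m,
       (if m = L.foldl (fun m t => pvStepM m t.2.2) m then c else []) ++
         pvCol (L.foldl (fun m t => pvStepM m t.2.2) m) L) := by
  induction L generalizing m c with
  | nil => simp [pvCol]
  | cons t L ih =>
    match m with
    | none =>
      simp only [List.foldl_cons, pvStepA_none, pvStepM_none, pvCol_cons, ih]
      obtain ⟨w, hw, _⟩ := pvStepM_mono L t.2.2
      simp [hw]
    | some v =>
      by_cases h1 : t.2.2 > v
      · simp only [List.foldl_cons, pvStepA_gt v c t h1, pvStepM_gt v t.2.2 h1, pvCol_cons, ih]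
        obtain ⟨w, hw, hle⟩ := pvStepM_mono L t.2.2
        rw [hw]
        have hne : (some v : Option Int) ≠ some w := by
          intro hc; injection hc with hc; omega
        simp [hne]
      · by_cases h2 : t.2.2 = v
        · subst h2
          simp only [List.foldl_cons, pvStepA_eq' _ c t rfl, pvStepM_le _ t.2.2 h1,
            pvCol_cons, ih]
          by_cases h3 : (some t.2.2 : Option Int)
              = L.foldl (fun m t => pvStepM m t.2.2) (some t.2.2)
          · simp [← h3]
          · simp [h3]
        · simp only [List.foldl_cons, pvStepA_lt v c t h1 h2, pvStepM_le v t.2.2 h1,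
            pvCol_cons, ih]
          obtain ⟨w, hw, hle⟩ := pvStepM_mono L v
          rw [hw]
          have hne : (some t.2.2 : Option Int) ≠ some w := by
            intro hc; injection hc with hc; omega
          simp [hne]

theorem pvColFold (M : Option Int) (L : List (Int × Int × Int)) (acc : List (Int × Int)) :
    L.foldl (fun acc t => if some t.2.2 = M then acc ++ [(t.1, t.2.1)] else acc) acc
      = acc ++ pvCol M L := by
  induction L generalizing acc with
  | nil => simp [pvCol]
  | cons t L ih =>
    rw [List.foldl_cons, ih, pvCol_cons]
    split_ifs with h
    · simp
    · simp

theorem pvPortB_eq (matrix : List (List Int)) :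
    find_max_coordinates_alt matrix = pvCol (pvAltMax matrix) (pvCells matrix) := by
  have h : ∀ M : Option Int,
      (PySem.List.enumerate matrix).foldl (fun acc p =>
        (PySem.List.enumerate p.2).foldl (fun acc q =>
          if some q.2 = M then acc ++ [(p.1, q.1)] else acc) acc) []
      = pvCol M (pvCells matrix) := by
    intro M
    have h1 : (pvCells matrix).foldl
        (fun acc t => if some t.2.2 = M then acc ++ [(t.1, t.2.1)] else acc) []
        = pvCol M (pvCells matrix) := by simpa using pvColFold M (pvCells matrix) []
    rw [← h1]
    simp only [pvCells, pvFoldl_flatMap, List.foldl_map]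
  simpa only [find_max_coordinates_alt] using h (pvAltMax matrix)

-- ===== VERDICT (by name: the statement is the Claim_ definition above) =====
theorem find_max_coordinates_spec : Claim_equal_find_max_coordinates := by
  intro matrix _
  unfold Spec_find_max_coordinates
  rw [pvPortA_eq, pvPortB_eq, pvAltMax_eq, pvFoldA_eq]
  simp
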